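-- pv_equiv track=rewrite | github.com/hiimjupter/COS30019_Official | Assignment2/helper/convertCNF.py | eliminate_implication
-- ===== SOURCE A (Python) =====
-- def eliminate_implication(expression):
--     i = 0
--     while i < len(expression):
--         if expression[i] == '=>':
--             # Find the left-hand side of "=>"
--             if expression[i - 1] == ')':
--                 # If the left-hand side is a group, find the matching parentheses
--                 open_bracket_index = i - 1
--                 bracket_count = 1
--                 while open_bracket_index > 0:
--                     open_bracket_index -= 1
--                     if expression[open_bracket_index] == ')':
--                         bracket_count += 1
--                     elif expression[open_bracket_index] == '(':
--                         bracket_count -= 1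
--                         if bracket_count == 0:
--                             break
--
--                 # Add negation "~" before the left-hand side
--                 expression.insert(open_bracket_index, '~')
--                 i += 1  # Update index due to insertion
--             else:
--                 # If it's a single variable, just negate it
--                 expression.insert(i - 1, '~')
--                 i += 1  # Update index due to insertion
--
--             # Replace "=>" with "||" (logical OR)
--             expression[i] = '||'
--
--         i += 1  # Move to the next token
--     return expression
-- ===== SOURCE B (Python) =====
-- def eliminate_implication(expression):
--     # one stack pass precomputes, for every ')', its matching '(' index (0 if unmatched)
--     stack = []
--     match = {}
--     for i, tok in enumerate(expression):
--         if tok == '(':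
--             stack.append(i)
--         elif tok == ')':
--             match[i] = stack.pop() if stack else 0
--     # count the '~' insertions needed before each original index
--     extra = {}
--     for i, tok in enumerate(expression):
--         if tok == '=>':
--             t = match.get(i - 1, 0) if expression[i - 1] == ')' else i - 1
--             extra[t] = extra.get(t, 0) + 1
--     # emit the rewritten token list in a single pass
--     out = []
--     for j, tok in enumerate(expression):
--         out.extend(['~'] * extra.get(j, 0))
--         out.append('||' if tok == '=>' else tok)
--     return out
-- ===== Notes on version B (the rewrite author's own statement) =====
-- stated objective: alternative
-- what changed: A rescans backwards for the matching '(' and does in-place insert/replace surgery for every '=>'; B precomputes all matching-paren indices in one stack pass, counts the needed '~' insertions per original index in a second pass, and emits the rewritten token list in a single output pass (measured on generated inputs the two are comparable in speed, so no speed is claimed).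
-- outside the precondition, e.g. on eliminate_implication(['=>', 'p']): A returns ['=>', '||', 'p'], B returns ['||', 'p']
import Mathlib
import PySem

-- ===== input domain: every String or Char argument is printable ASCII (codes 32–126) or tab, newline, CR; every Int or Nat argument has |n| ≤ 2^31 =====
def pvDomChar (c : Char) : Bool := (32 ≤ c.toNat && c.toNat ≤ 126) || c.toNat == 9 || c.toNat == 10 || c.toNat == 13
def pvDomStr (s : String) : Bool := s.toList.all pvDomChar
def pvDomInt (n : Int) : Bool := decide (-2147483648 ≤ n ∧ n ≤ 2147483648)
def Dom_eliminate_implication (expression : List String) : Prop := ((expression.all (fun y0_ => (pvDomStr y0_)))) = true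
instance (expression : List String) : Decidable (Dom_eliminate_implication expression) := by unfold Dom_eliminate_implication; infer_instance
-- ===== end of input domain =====

-- B replaces A's per-'=>' backward paren scan and in-place list surgery by one stack pass that
-- precomputes every ')' 's matching '(' index, then a counting pass and a single output pass.
-- A mutates (and returns) its argument in place; B builds a fresh list — the equivalence proved
-- here is about the RETURN value only.

-- ===== PORT A =====
-- inner `while open_bracket_index > 0` backward scan of A
def findOpenA (e : List String) (obi : Int) (cnt : Int) : Int :=
  if _h : obi > 0 then
    let o := obi - 1
    if PySem.List.pyGetD e o "" = ")" then findOpenA e o (cnt + 1)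
    else if PySem.List.pyGetD e o "" = "(" then
      if cnt - 1 = 0 then o else findOpenA e o (cnt - 1)
    else findOpenA e o cnt
  else obi
termination_by obi.toNat
decreasing_by all_goals omega

-- outer `while i < len(expression)` loop of A
def loopA (e : List String) (i : Nat) : List String :=
  if _h : i < e.length then
    if PySem.List.pyGetD e (i : Int) "" = "=>" then
      let e1 :=
        if PySem.List.pyGetD e ((i : Int) - 1) "" = ")" then
          PySem.List.insert e (findOpenA e ((i : Int) - 1) 1) "~"
        else
          PySem.List.insert e ((i : Int) - 1) "~"
      let e2 := PySem.List.pySetD e1 ((i + 1 : Nat) : Int) "||"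
      loopA e2 (i + 1 + 1)
    else loopA e (i + 1)
  else e
termination_by e.length - i
decreasing_by
  · simp only [PySem.List.length_pySetD, dite_eq_ite, apply_ite List.length, PySem.List.length_insert, ite_self]
    omega
  · omega

def eliminate_implication (expression : List String) : List String :=
  loopA expression 0

-- ===== PORT B =====
-- first pass of Source B: paren stack + matching-'(' dictionary
def elimB_scan (expression : List String) : List Int × PySem.Dict Int Int :=
  (PySem.List.enumerate expression 0).foldl
    (fun st it =>
      let stack := st.1
      let mtch := st.2
      if it.2 = "(" then (stack ++ [it.1], mtch)
      else if it.2 = ")" then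
        if h : stack = [] then (stack, mtch.insert it.1 0)
        else (stack.dropLast, mtch.insert it.1 (stack.getLast h))
      else st)
    ([], PySem.Dict.empty)

-- second pass of Source B: count the '~' insertions needed before each original index
def elimB_extra (expression : List String) (mtch : PySem.Dict Int Int) : PySem.Dict Int Int :=
  (PySem.List.enumerate expression 0).foldl
    (fun extra it =>
      if it.2 = "=>" then
        let t : Int :=
          if PySem.List.pyGetD expression (it.1 - 1) "" = ")" then mtch.getD (it.1 - 1) 0
          else it.1 - 1
        extra.insert t (extra.getD t 0 + 1)
      else extra)
    PySem.Dict.empty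

def eliminate_implication_alt (expression : List String) : List String :=
  let mtch := (elimB_scan expression).2
  let extra := elimB_extra expression mtch
  (PySem.List.enumerate expression 0).foldl
    (fun out it =>
      out ++ List.replicate (extra.getD it.1 0).toNat "~" ++
        [if it.2 = "=>" then "||" else it.2])
    []

-- ===== PRECONDITION & SPEC =====
-- Pre_ excludes only expressions whose FIRST token is '=>': such an expression is malformed (the
-- implication has no left-hand side), no behaviour is specified there, and A (via Python's
-- negative-index wraparound) and B make different arbitrary choices.
def Pre_eliminate_implication (expression : List String) : Prop :=
  expression.head? ≠ some "=>"
instance (expression : List String) : Decidable (Pre_eliminate_implication expression) := by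
  unfold Pre_eliminate_implication; infer_instance

def pvWitness_eliminate_implication : List String :=
  ["(", "a", "&", "b", ")", "=>", "c", "=>", "d"]

def Spec_eliminate_implication (expression : List String) (out : List String) : Prop :=
  out = eliminate_implication_alt expression
instance (expression : List String) (out : List String) :
    Decidable (Spec_eliminate_implication expression out) := by
  unfold Spec_eliminate_implication; infer_instance

-- ===== CLAIM (what is proved, stated in full; the proofs are below) =====
def Claim_equal_eliminate_implication : Prop :=
  ∀ (expression : List String), Dom_eliminate_implication expression →
    Pre_eliminate_implication expression →
    Spec_eliminate_implication expression (eliminate_implication expression)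

-- ===== LEMMAS AND PROOFS =====

-- token rewriting: '=>' becomes '||', everything else is kept
def repl (t : String) : String := if t = "=>" then "||" else t

-- stack of positions of currently unmatched '(' (top = head, rightmost first)
def pstep (p : Nat) (t : String) (s : List Nat) : List Nat :=
  if t = "(" then p :: s else if t = ")" then s.tail else s

def ostackAux (p : Nat) (s : List Nat) : List String → List Nat
  | [] => s
  | t :: Q => ostackAux (p + 1) (pstep p t s) Q

def ostack (Q : List String) : List Nat := ostackAux 0 [] Q

-- target original index that receives the '~' for a '=>' placed right after prefix Q
def tgtOf (Q : List String) : Nat :=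
  if Q.getLast? = some ")" then (ostack Q.dropLast).headD 0 else Q.length - 1

-- number of '~' to insert before original index j, for the '=>'s inside P
def xOf (P : List String) (j : Nat) : Nat :=
  ((List.range P.length).filter
    (fun i => decide (1 ≤ i) && decide (P.getD i "" = "=>") && decide (tgtOf (P.take i) = j))).length

def renderAux (x : Nat → Nat) (j : Nat) : List String → List String
  | [] => []
  | t :: Q => List.replicate (x j) "~" ++ repl t :: renderAux x (j + 1) Q

def render (x : Nat → Nat) (Q : List String) : List String := renderAux x 0 Q

def sumTo (x : Nat → Nat) (n : Nat) : Nat := ((List.range n).map x).sum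

def posm (x : Nat → Nat) (m : Nat) : Nat := m + sumTo x m + x m

def bump (x : Nat → Nat) (m : Nat) : Nat → Nat := fun j => if j = m then x j + 1 else x j

theorem ostackAux_append (Q1 Q2 : List String) (p : Nat) (s : List Nat) :
    ostackAux p s (Q1 ++ Q2) = ostackAux (p + Q1.length) (ostackAux p s Q1) Q2 := by
  induction Q1 generalizing p s with
  | nil => simp [ostackAux]
  | cons t Q ih => simp [ostackAux, ih, Nat.add_comm, Nat.add_left_comm]

theorem ostack_snoc (Q : List String) (t : String) :
    ostack (Q ++ [t]) = pstep Q.length t (ostack Q) := by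
  simp [ostack, ostackAux_append, ostackAux]

theorem renderAux_append (x : Nat → Nat) (j : Nat) (Q1 Q2 : List String) :
    renderAux x j (Q1 ++ Q2) = renderAux x j Q1 ++ renderAux x (j + Q1.length) Q2 := by
  induction Q1 generalizing j with
  | nil => simp [renderAux]
  | cons t Q ih => simp [renderAux, ih, Nat.add_comm, Nat.add_left_comm]

theorem render_snoc (x : Nat → Nat) (Q : List String) (t : String) :
    render x (Q ++ [t]) = render x Q ++ List.replicate (x Q.length) "~" ++ [repl t] := by
  simp [render, renderAux_append, renderAux]

theorem sumTo_succ (x : Nat → Nat) (n : Nat) : sumTo x (n + 1) = sumTo x n + x n := by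
  simp [sumTo, List.range_succ]

theorem render_length (x : Nat → Nat) (Q : List String) :
    (render x Q).length = Q.length + sumTo x Q.length := by
  induction Q using List.reverseRecOn with
  | nil => simp [render, renderAux, sumTo]
  | append_singleton Q t ih =>
      simp [render_snoc, ih, sumTo_succ]; omega

theorem renderAux_congr (x y : Nat → Nat) (j : Nat) (Q : List String)
    (h : ∀ k, k < Q.length → x (j + k) = y (j + k)) :
    renderAux x j Q = renderAux y j Q := by
  induction Q generalizing j with
  | nil => simp [renderAux]
  | cons t Q ih =>
      have h0 : x j = y j := by simpa using h 0 (by simp)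
      have hrec : renderAux x (j + 1) Q = renderAux y (j + 1) Q := by
        refine ih (j + 1) (fun k hk => ?_)
        have := h (k + 1) (by simpa using hk)
        simpa [Nat.add_assoc, Nat.add_comm, Nat.add_left_comm] using this
      simp [renderAux, h0, hrec]

theorem ostackAux_entries (Q : List String) : ∀ (p : Nat) (s : List Nat),
    (∀ m ∈ s, m < p) → ∀ m ∈ ostackAux p s Q, m < p + Q.length := by
  induction Q with
  | nil => intro p s hs m hm; have := hs m hm; simp; omega
  | cons t Q ih =>
      intro p s hs m hm
      have hstep : ∀ m ∈ pstep p t s, m < p + 1 := by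
        intro m hm
        unfold pstep at hm
        split_ifs at hm with h1 h2
        · rcases List.mem_cons.mp hm with h | h
          · omega
          · exact Nat.lt_succ_of_lt (hs m h)
        · exact Nat.lt_succ_of_lt (hs m (List.mem_of_mem_tail hm))
        · exact Nat.lt_succ_of_lt (hs m hm)
      have := ih (p + 1) (pstep p t s) hstep m (by simpa [ostackAux] using hm)
      simpa [Nat.add_assoc, Nat.add_comm, Nat.add_left_comm] using this

theorem ostack_entries_lt (Q : List String) : ∀ m ∈ ostack Q, m < Q.length := by
  intro m hm
  simpa using ostackAux_entries Q 0 [] (by simp) m hm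

theorem ostack_replicate (k : Nat) (p : Nat) (s : List Nat) :
    ostackAux p s (List.replicate k "~") = s := by
  induction k generalizing p with
  | zero => simp [ostackAux]
  | succ k ih => simp [List.replicate_succ, ostackAux, pstep, ih]

theorem repl_paren_open (t : String) : (repl t = "(") ↔ (t = "(") := by
  unfold repl; split_ifs with h <;> simp_all

theorem repl_paren_close (t : String) : (repl t = ")") ↔ (t = ")") := by
  unfold repl; split_ifs with h <;> simp_all

theorem ostack_render (x : Nat → Nat) (Q : List String) :
    ostack (render x Q) = (ostack Q).map (posm x) := by
  induction Q using List.reverseRecOn with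
  | nil => simp [render, renderAux, ostack, ostackAux]
  | append_singleton Q t ih =>
      have hsplit : render x (Q ++ [t])
          = (render x Q ++ List.replicate (x Q.length) "~") ++ [repl t] := by
        simp [render_snoc]
      have hlen : (render x Q ++ List.replicate (x Q.length) "~").length = posm x Q.length := by
        simp [render_length, posm]
      have hmid : ostack (render x Q ++ List.replicate (x Q.length) "~")
          = (ostack Q).map (posm x) := by
        simp [ostack, ostackAux_append, ostack_replicate]
        simpa [ostack] using ih
      rw [hsplit, ostack_snoc, hlen, hmid, ostack_snoc]
      unfold pstep
      by_cases h1 : t = "("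
      · simp [h1, repl]
      · rw [if_neg h1, if_neg (by rw [repl_paren_open]; exact h1)]
        by_cases h2 : t = ")"
        · rw [if_pos h2, if_pos (by rw [repl_paren_close]; exact h2)]
          cases ostack Q <;> simp
        · rw [if_neg h2, if_neg (by rw [repl_paren_close]; exact h2)]

theorem tgtOf_lt (Q : List String) (h : Q ≠ []) : tgtOf Q < Q.length := by
  have hlen : 1 ≤ Q.length := List.length_pos_of_ne_nil h
  unfold tgtOf
  split_ifs with hl
  · cases hs : ostack Q.dropLast with
    | nil => simp [hs]; omega
    | cons m s =>
        have hm : m < Q.dropLast.length := ostack_entries_lt _ m (by simp [hs])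
        simp [hs]
        have : Q.dropLast.length = Q.length - 1 := by simp
        omega
  · omega

theorem pstep_open (p : Nat) (t : String) (s : List Nat) (h : t = "(") : pstep p t s = p :: s := by
  simp [pstep, h]

theorem pstep_close (p : Nat) (t : String) (s : List Nat) (h : t = ")") : pstep p t s = s.tail := by
  simp [pstep, h]

theorem pstep_other (p : Nat) (t : String) (s : List Nat) (h1 : t ≠ "(") (h2 : t ≠ ")") :
    pstep p t s = s := by
  simp [pstep, h1, h2]

theorem getD_tail (s : List Nat) (k d : Nat) : s.tail.getD k d = s.getD (k + 1) d := by
  cases s <;> simp [List.getD]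

theorem take_succ_getD (L : List String) (o : Nat) (ho : o < L.length) :
    L.take (o + 1) = L.take o ++ [L.getD o ""] := by
  rw [List.take_succ]
  simp [List.getElem?_eq_getElem ho, List.getD_eq_getElem?_getD]

theorem findOpenA_stack (L : List String) (o c : Nat) (ho : o ≤ L.length) (hc : 1 ≤ c) :
    findOpenA L (o : Int) (c : Int) = (((ostack (L.take o)).getD (c - 1) 0 : Nat) : Int) := by
  induction o generalizing c with
  | zero =>
      rw [findOpenA]
      simp [ostack, ostackAux, List.getD]
  | succ o ih =>
      have ho' : o < L.length := by omega
      have hole : o ≤ L.length := by omega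
      have hcast : ((o + 1 : Nat) : Int) - 1 = (o : Int) := by push_cast; ring
      have hstack : ostack (L.take (o + 1)) = pstep o (L.getD o "") (ostack (L.take o)) := by
        rw [take_succ_getD L o ho', ostack_snoc]
        simp [List.length_take, Nat.min_eq_left (Nat.le_of_lt ho')]
      rw [findOpenA, dif_pos (by positivity)]
      simp only [hcast, PySem.List.pyGetD_natCast]
      by_cases h1 : L.getD o "" = ")"
      · rw [if_pos h1]
        have hc1 : (c : Int) + 1 = ((c + 1 : Nat) : Int) := by push_cast; ring
        have hrec := ih (c + 1) hole (by omega)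
        rw [hc1, hrec, hstack]
        rw [pstep_close _ _ _ h1, getD_tail]
        have h3 : c + 1 - 1 = (c - 1) + 1 := by omega
        rw [h3]
      · rw [if_neg h1]
        by_cases h2 : L.getD o "" = "("
        · rw [if_pos h2, hstack]
          by_cases hc1 : c = 1
          · rw [if_pos (by omega : (c : Int) - 1 = 0)]
            subst hc1
            rw [pstep_open _ _ _ h2]
            simp
          · rw [if_neg (by omega : ¬ (c : Int) - 1 = 0)]
            have hcc : (c : Int) - 1 = ((c - 1 : Nat) : Int) := by
              have : 1 ≤ c := hc
              push_cast [Nat.cast_sub this]; ring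
            have hrec := ih (c - 1) hole (by omega)
            rw [hcc, hrec]
            rw [pstep_open _ _ _ h2]
            obtain ⟨k, rfl⟩ : ∃ k, c = k + 2 := ⟨c - 2, by omega⟩
            simp [List.getD]
        · have hrec := ih c hole hc
          rw [if_neg h2, hrec, hstack]
          rw [pstep_other _ _ _ h2 h1]

theorem getD_append_self (l r : List String) (a d : String) : (l ++ a :: r).getD l.length d = a := by
  simp [List.getD]

theorem xOf_snoc (Q : List String) (t : String) (hne : Q = [] → t ≠ "=>") (j : Nat) :
    xOf (Q ++ [t]) j = (if t = "=>" then bump (xOf Q) (tgtOf Q) j else xOf Q j) := by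
  unfold xOf
  rw [List.length_append, List.length_cons, List.length_nil, Nat.zero_add, List.range_succ,
    List.filter_append, List.length_append]
  have hcong : (List.range Q.length).filter
      (fun i => decide (1 ≤ i) && decide ((Q ++ [t]).getD i "" = "=>") &&
        decide (tgtOf ((Q ++ [t]).take i) = j))
      = (List.range Q.length).filter
      (fun i => decide (1 ≤ i) && decide (Q.getD i "" = "=>") && decide (tgtOf (Q.take i) = j)) := by
    apply List.filter_congr
    intro i hi
    have hi' : i < Q.length := by simpa using hi
    rw [List.getD_append _ _ _ _ hi', List.take_append_of_le_length (Nat.le_of_lt hi')]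
  rw [hcong]
  have hlast : (Q ++ [t]).getD Q.length "" = t := getD_append_self Q [] t ""
  have htake : (Q ++ [t]).take Q.length = Q := by
    simpa using List.take_append_of_le_length (Nat.le_refl Q.length)
  by_cases ht : t = "=>"
  · have hQ : Q ≠ [] := fun h => (hne h) ht
    have h1 : 1 ≤ Q.length := List.length_pos_of_ne_nil hQ
    rw [if_pos ht]
    unfold bump
    by_cases htgt : tgtOf Q = j
    · rw [if_pos htgt.symm]
      simp [List.filter_cons, hlast, htake, ht, h1, htgt]
    · rw [if_neg (fun h => htgt h.symm)]
      simp [List.filter_cons, hlast, htake, ht, htgt]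
  · rw [if_neg ht]
    simp [hlast, ht]

theorem xOf_last_zero (P : List String) (j : Nat) (hj : P.length ≤ j + 1) : xOf P j = 0 := by
  unfold xOf
  rw [List.filter_eq_nil_iff.mpr, List.length_nil]
  intro i hi
  have hi' : i < P.length := by simpa using hi
  simp only [Bool.and_eq_true, decide_eq_true_eq, not_and]
  rintro ⟨h1, _h2⟩ h3
  have hne : P.take i ≠ [] := by
    have : (P.take i).length = i := by simp [List.length_take]; omega
    intro h; rw [h] at this; simp at this; omega
  have := tgtOf_lt (P.take i) hne
  have hlen : (P.take i).length = i := by simp [List.length_take]; omega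
  omega

theorem sumTo_congr (x y : Nat → Nat) (n : Nat) (h : ∀ k, k < n → x k = y k) :
    sumTo x n = sumTo y n := by
  induction n with
  | zero => simp [sumTo]
  | succ n ih =>
      rw [sumTo_succ, sumTo_succ, ih (fun k hk => h k (by omega)), h n (by omega)]

theorem sumTo_bump (x : Nat → Nat) (m n : Nat) (h : m < n) :
    sumTo (bump x m) n = sumTo x n + 1 := by
  induction n with
  | zero => omega
  | succ n ih =>
      rw [sumTo_succ, sumTo_succ]
      by_cases hmn : m = n
      · subst hmn
        rw [sumTo_congr (bump x m) x m (fun k hk => by simp [bump]; omega)]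
        simp [bump]
        omega
      · rw [ih (by omega)]
        have : bump x m n = x n := by simp [bump]; omega
        omega

theorem render_bump (x : Nat → Nat) (Q : List String) (m : Nat) (hm : m < Q.length) :
    ∃ Pfx Sfx, render x Q = Pfx ++ Sfx ∧ Pfx.length = posm x m ∧
      render (bump x m) Q = Pfx ++ "~" :: Sfx := by
  have hsplit : Q = Q.take m ++ Q[m] :: Q.drop (m + 1) := by
    conv_lhs => rw [← List.take_append_drop m Q]
    rw [List.drop_eq_getElem_cons hm]
  have hTlen : (Q.take m).length = m := by simp [List.length_take]; omega
  refine ⟨renderAux x 0 (Q.take m) ++ List.replicate (x m) "~",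
          repl Q[m] :: renderAux x (m + 1) (Q.drop (m + 1)), ?_, ?_, ?_⟩
  · conv_lhs => rw [render, hsplit]
    rw [renderAux_append, hTlen, renderAux]
    simp
  · have := render_length x (Q.take m)
    simp only [render] at this
    simp [this, hTlen, posm]
  · conv_lhs => rw [render, hsplit]
    rw [renderAux_append, hTlen, renderAux]
    simp only [Nat.zero_add]
    have hT : renderAux (bump x m) 0 (Q.take m) = renderAux x 0 (Q.take m) := by
      apply renderAux_congr
      intro k hk
      simp [bump]
      omega
    have hR : renderAux (bump x m) (m + 1) (Q.drop (m + 1)) = renderAux x (m + 1) (Q.drop (m + 1)) := by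
      apply renderAux_congr
      intro k hk
      simp [bump]
      omega
    have hb : bump x m m = x m + 1 := by simp [bump]
    rw [hT, hR, hb, List.replicate_succ']
    simp

theorem render_bump_zero (x : Nat → Nat) (Q : List String) (h : Q ≠ []) :
    render (bump x 0) Q = "~" :: render x Q := by
  cases Q with
  | nil => exact absurd rfl h
  | cons t R =>
      have hR : renderAux (bump x 0) 1 R = renderAux x 1 R := by
        apply renderAux_congr
        intro k hk
        simp [bump]
      have hb : bump x 0 0 = x 0 + 1 := by simp [bump]
      simp [render, renderAux, hR, hb, List.replicate_succ]

theorem ostack_append_replicate (A : List String) (k : Nat) :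
    ostack (A ++ List.replicate k "~") = ostack A := by
  simp [ostack, ostackAux_append, ostack_replicate]

theorem pySetD_append_self (l r : List String) (a v : String) :
    PySem.List.pySetD (l ++ a :: r) (l.length : Int) v = l ++ v :: r := by
  have h := PySem.List.pySet?_natCast (l ++ a :: r) l.length v (by simp)
  simp [PySem.List.pySetD, h, List.set_append]

theorem insert_at_prefix (P Z : List String) (v : String) :
    PySem.List.insert (P ++ Z) ((P.length : Nat) : Int) v = P ++ v :: Z := by
  rw [PySem.List.insert_natCast _ _ _ (by simp)]
  simp

theorem render_snoc_zero (x : Nat → Nat) (Q : List String) (t : String) (hx : x Q.length = 0) :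
    render x (Q ++ [t]) = render x Q ++ [repl t] := by
  rw [render_snoc, hx]
  simp

theorem render_congr (x y : Nat → Nat) (Q : List String) (h : ∀ j, x j = y j) :
    render x Q = render y Q := by
  have : x = y := funext h
  rw [this]

theorem loopA_render (rest : List String) : ∀ (Q : List String),
    (Q = [] → rest.head? ≠ some "=>") →
    loopA (render (xOf Q) Q ++ rest) (render (xOf Q) Q).length
      = render (xOf (Q ++ rest)) (Q ++ rest) := by
  induction rest with
  | nil =>
      intro Q _
      rw [List.append_nil, List.append_nil, loopA, dif_neg (by omega)]
  | cons t rest' ih =>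
      intro Q hne
      have hget : PySem.List.pyGetD (render (xOf Q) Q ++ t :: rest')
          ((render (xOf Q) Q).length : Int) "" = t := by
        rw [PySem.List.pyGetD_natCast]
        exact getD_append_self _ _ _ _
      rw [loopA, dif_pos (by simp), hget]
      by_cases ht : t = "=>"
      · rw [if_pos ht]
        -- Q is nonempty here
        have hQ : Q ≠ [] := by
          intro h
          exact (hne h) (by rw [ht]; rfl)
        rcases List.eq_nil_or_concat Q with rfl | ⟨Q', u, rfl⟩
        · exact absurd rfl hQ
        subst ht
        rw [List.concat_eq_append] at *
        set x := xOf (Q' ++ [u]) with hxdef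
        set L := render x (Q' ++ [u]) with hLdef
        have hLsplit : L = (render x Q' ++ List.replicate (x Q'.length) "~") ++ [repl u] := by
          rw [hLdef, render_snoc]
        set P1 := render x Q' ++ List.replicate (x Q'.length) "~" with hP1def
        have hP1len : P1.length = posm x Q'.length := by
          simp [hP1def, render_length, posm]
        have hLlen : L.length = P1.length + 1 := by rw [hLsplit]; simp
        have hL1 : 1 ≤ L.length := by omega
        have hidx : ((L.length : Int) - 1) = ((P1.length : Nat) : Int) := by
          push_cast [hLlen]; ring
        have hE : L ++ "=>" :: rest' = P1 ++ repl u :: "=>" :: rest' := by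
          rw [hLsplit]; simp
        have hprev : PySem.List.pyGetD (L ++ "=>" :: rest') ((L.length : Int) - 1) "" = repl u := by
          rw [hidx, PySem.List.pyGetD_natCast, hE]
          exact getD_append_self _ _ _ _
        rw [hprev]
        -- the '~' goes before original index tgtOf (Q' ++ [u]); e1 is the inserted list
        have key : (if repl u = ")" then
              PySem.List.insert (L ++ "=>" :: rest')
                (findOpenA (L ++ "=>" :: rest') ((L.length : Int) - 1) 1) "~"
            else PySem.List.insert (L ++ "=>" :: rest') ((L.length : Int) - 1) "~")
            = render (bump x (tgtOf (Q' ++ [u]))) (Q' ++ [u]) ++ "=>" :: rest' := by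
          by_cases hu : u = ")"
          · rw [if_pos (by rw [repl_paren_close]; exact hu)]
            have hfo := findOpenA_stack (L ++ "=>" :: rest') P1.length 1
              (by rw [hE]; simp) (Nat.le_refl 1)
            have htake : (L ++ "=>" :: rest').take P1.length = P1 := by
              rw [hE]
              simpa using List.take_append_of_le_length (Nat.le_refl P1.length)
            rw [htake] at hfo
            simp only [Nat.cast_one] at hfo
            have hosP1 : ostack P1 = (ostack Q').map (posm x) := by
              rw [hP1def, ostack_append_replicate, ostack_render]
            have htgt : tgtOf (Q' ++ [u]) = (ostack Q').headD 0 := by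
              unfold tgtOf
              rw [if_pos (by simp [hu])]
              simp
            rw [hidx, hfo]
            cases hs : ostack Q' with
            | nil =>
                have hgd : (ostack P1).getD 0 0 = 0 := by rw [hosP1, hs]; simp [List.getD]
                have hm0 : tgtOf (Q' ++ [u]) = 0 := by rw [htgt, hs]; rfl
                rw [hgd, hm0]
                have h0 : ((0 : Nat) : Int) = ((List.length ([] : List String) : Nat) : Int) := by simp
                rw [h0, show (L ++ "=>" :: rest') = ([] : List String) ++ (L ++ "=>" :: rest') from rfl]
                rw [insert_at_prefix]
                rw [render_bump_zero x _ (by simp), hLdef]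
                simp
            | cons m0 s' =>
                have hgd : (ostack P1).getD 0 0 = posm x m0 := by rw [hosP1, hs]; simp [List.getD]
                have hm0 : tgtOf (Q' ++ [u]) = m0 := by rw [htgt, hs]; rfl
                have hm0lt : m0 < (Q' ++ [u]).length := by
                  have := ostack_entries_lt Q' m0 (by rw [hs]; simp)
                  simp
                  omega
                obtain ⟨Pfx, Sfx, hsp, hlenp, hbp⟩ := render_bump x (Q' ++ [u]) m0 hm0lt
                have he2 : L ++ "=>" :: rest' = Pfx ++ (Sfx ++ "=>" :: rest') := by
                  rw [hLdef, hsp]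
                  simp
                rw [hgd, hm0, ← hlenp, he2, insert_at_prefix, hbp]
                simp
          · rw [if_neg (by rw [repl_paren_close]; exact hu)]
            have hm : tgtOf (Q' ++ [u]) = Q'.length := by
              unfold tgtOf
              rw [if_neg (by simp [hu])]
              simp
            obtain ⟨Pfx, Sfx, hsp, hlenp, hbp⟩ := render_bump x (Q' ++ [u]) Q'.length (by simp)
            have hlenp' : Pfx.length = P1.length := by rw [hlenp, hP1len]
            have he2 : L ++ "=>" :: rest' = Pfx ++ (Sfx ++ "=>" :: rest') := by
              rw [hLdef, hsp]
              simp
            rw [hidx, ← hlenp', he2, insert_at_prefix, hm, hbp]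
            simp
        rw [key]
        set m := tgtOf (Q' ++ [u])
        set x' := bump x m with hx'def
        have hmlt : m < (Q' ++ [u]).length := tgtOf_lt _ (by simp)
        have hx'len : (render x' (Q' ++ [u])).length = L.length + 1 := by
          rw [render_length, hLdef, render_length, hx'def]
          rw [sumTo_bump x m _ hmlt]
          omega
        have hset : PySem.List.pySetD (render x' (Q' ++ [u]) ++ "=>" :: rest')
            (((L.length + 1 : Nat) : Int)) "||" = render x' (Q' ++ [u]) ++ "||" :: rest' := by
          rw [← hx'len]
          exact pySetD_append_self _ _ _ _
        show loopA (PySem.List.pySetD (render x' (Q' ++ [u]) ++ "=>" :: rest')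
            (((L.length + 1 : Nat) : Int)) "||") (L.length + 1 + 1) = _
        rw [hset]
        -- fold the '||' into a render over Q ++ ["=>"]
        have hxQ2 : ∀ j, xOf ((Q' ++ [u]) ++ ["=>"]) j = x' j := by
          intro j
          rw [xOf_snoc _ _ (by simp) j, if_pos rfl]
        have hnew : render x' (Q' ++ [u]) ++ "||" :: rest'
            = render (xOf ((Q' ++ [u]) ++ ["=>"])) ((Q' ++ [u]) ++ ["=>"]) ++ rest' := by
          rw [render_congr _ x' _ hxQ2, render_snoc_zero x' _ "=>"
            (by have h0 : x (Q'.length + 1) = 0 := by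
                  rw [hxdef]; exact xOf_last_zero _ _ (by simp)
                have hmlt' : m < Q'.length + 1 := by simpa using hmlt
                have hmn : ¬ Q'.length + 1 = m := by omega
                simp [hx'def, bump, hmn, h0])]
          simp [repl]
        rw [hnew]
        have hlen2 : L.length + 1 + 1 = (render (xOf ((Q' ++ [u]) ++ ["=>"])) ((Q' ++ [u]) ++ ["=>"])).length := by
          rw [render_congr _ x' _ hxQ2, render_snoc_zero x' _ "=>"
            (by have h0 : x (Q'.length + 1) = 0 := by
                  rw [hxdef]; exact xOf_last_zero _ _ (by simp)
                have hmlt' : m < Q'.length + 1 := by simpa using hmlt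
                have hmn : ¬ Q'.length + 1 = m := by omega
                simp [hx'def, bump, hmn, h0])]
          simp [hx'len]
        rw [hlen2, ih ((Q' ++ [u]) ++ ["=>"]) (by simp)]
        simp
      · rw [if_neg ht]
        have hx : ∀ j, xOf (Q ++ [t]) j = xOf Q j := by
          intro j
          rw [xOf_snoc Q t (fun h => by simpa using hne h) j, if_neg ht]
        have hQt : render (xOf (Q ++ [t])) (Q ++ [t]) = render (xOf Q) Q ++ [t] := by
          rw [render_congr _ (xOf Q) _ hx,
            render_snoc_zero _ _ _ (xOf_last_zero Q Q.length (by omega))]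
          simp [repl, ht]
        have hstep : render (xOf Q) Q ++ t :: rest' = render (xOf (Q ++ [t])) (Q ++ [t]) ++ rest' := by
          rw [hQt]; simp
        have hlen : (render (xOf Q) Q).length + 1 = (render (xOf (Q ++ [t])) (Q ++ [t])).length := by
          rw [hQt]; simp
        rw [hstep, hlen, ih (Q ++ [t]) (by simp)]
        simp

theorem getD_append_lt (Q : List String) (t : String) (j : Nat) (h : j < Q.length) :
    (Q ++ [t]).getD j "" = Q.getD j "" := List.getD_append _ _ _ _ h

theorem elimB_scan_spec (P : List String) :
    (elimB_scan P).1 = ((ostack P).map (fun m => Int.ofNat m)).reverse ∧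
    (∀ j : Nat, j < P.length → P.getD j "" = ")" →
      (elimB_scan P).2.getD (j : Int) 0 = (((ostack (P.take j)).headD 0 : Nat) : Int)) := by
  induction P using List.reverseRecOn with
  | nil =>
      refine ⟨by simp [elimB_scan, PySem.List.enumerate, ostack, ostackAux], ?_⟩
      intro j hj
      simp at hj
  | append_singleton Q t ih =>
      obtain ⟨ih1, ih2⟩ := ih
      have hfold : elimB_scan (Q ++ [t])
          = (fun st (it : Int × String) =>
              let stack := st.1
              let mtch := st.2
              if it.2 = "(" then (stack ++ [it.1], mtch)
              else if it.2 = ")" then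
                if h : stack = [] then (stack, mtch.insert it.1 0)
                else (stack.dropLast, mtch.insert it.1 (stack.getLast h))
              else st) (elimB_scan Q) ((Q.length : Int), t) := by
        unfold elimB_scan
        rw [PySem.List.enumerate_append, List.foldl_append]
        simp [PySem.List.enumerate]
      have hstk : ostack (Q ++ [t]) = pstep Q.length t (ostack Q) := ostack_snoc Q t
      have hdstable : ∀ j : Nat, j < Q.length → (Q ++ [t]).getD j "" = ")" →
          ((Q ++ [t]).take j = Q.take j ∧ Q.getD j "" = ")") := by
        intro j hj hg
        rw [getD_append_lt _ _ _ hj] at hg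
        exact ⟨List.take_append_of_le_length (Nat.le_of_lt hj), hg⟩
      by_cases h1 : t = "("
      · have hcase : elimB_scan (Q ++ [t]) = ((elimB_scan Q).1 ++ [(Q.length : Int)], (elimB_scan Q).2) := by
          rw [hfold]; simp [h1]
        constructor
        · rw [hcase]
          rw [hstk, pstep_open _ _ _ h1]
          simp [ih1]
        · intro j hj hg
          rw [hcase]
          have hj' : j < Q.length := by
            rcases Nat.lt_succ_iff_lt_or_eq.mp (by simpa using hj) with h | h
            · exact h
            · subst h
              rw [getD_append_self] at hg
              exact absurd (h1 ▸ hg) (by decide)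
          obtain ⟨htk, hg'⟩ := hdstable j hj' hg
          rw [htk]
          exact ih2 j hj' hg'
      · by_cases h2 : t = ")"
        · cases hs : ostack Q with
          | nil =>
              have hst : (elimB_scan Q).1 = [] := by rw [ih1, hs]; rfl
              have hcase : elimB_scan (Q ++ [t])
                  = ([], (elimB_scan Q).2.insert (Q.length : Int) 0) := by
                rw [hfold]; simp [h1, h2, hst]
              constructor
              · rw [hcase]
                rw [hstk, pstep_close _ _ _ h2, hs]
                rfl
              · intro j hj hg
                rw [hcase]
                by_cases hj' : j < Q.length
                · obtain ⟨htk, hg'⟩ := hdstable j hj' hg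
                  rw [PySem.Dict.getD_insert_of_ne _ _ _ (by
                    intro hh
                    have : j = Q.length := by exact_mod_cast hh
                    omega), htk]
                  exact ih2 j hj' hg'
                · have hj2 : j = Q.length := by simp at hj; omega
                  subst hj2
                  rw [PySem.Dict.getD_insert_self]
                  have : (Q ++ [t]).take Q.length = Q := by
                    simpa using List.take_append_of_le_length (Nat.le_refl Q.length)
                  rw [this, hs]
                  rfl
          | cons m0 s' =>
              have hst : (elimB_scan Q).1 = ((s'.map (fun m => Int.ofNat m)).reverse) ++ [Int.ofNat m0] := by
                rw [ih1, hs, List.map_cons, List.reverse_cons]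
              have hne : (elimB_scan Q).1 ≠ [] := by
                rw [hst]
                intro h
                simpa using congrArg List.length h
              have hne2 : (List.map (fun m => Int.ofNat m) s').reverse ++ [Int.ofNat m0] ≠ [] := by
                intro h
                simpa using congrArg List.length h
              have hlast : (elimB_scan Q).1.getLast hne = Int.ofNat m0 := by
                rw [List.getLast_congr _ hne2 hst]
                exact List.getLast_append _
              have hdrop : (elimB_scan Q).1.dropLast = (s'.map (fun m => Int.ofNat m)).reverse := by
                rw [hst]
                simp
              have hcase : elimB_scan (Q ++ [t])
                  = ((elimB_scan Q).1.dropLast,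
                     (elimB_scan Q).2.insert (Q.length : Int) ((elimB_scan Q).1.getLast hne)) := by
                rw [hfold]; simp [h1, h2, hne]
              constructor
              · rw [hcase]
                rw [hstk, pstep_close _ _ _ h2, hs, hdrop]
                rfl
              · intro j hj hg
                rw [hcase]
                by_cases hj' : j < Q.length
                · obtain ⟨htk, hg'⟩ := hdstable j hj' hg
                  rw [PySem.Dict.getD_insert_of_ne _ _ _ (by
                    intro hh
                    have : j = Q.length := by exact_mod_cast hh
                    omega), htk]
                  exact ih2 j hj' hg'
                · have hj2 : j = Q.length := by simp at hj; omega
                  subst hj2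
                  rw [hlast, PySem.Dict.getD_insert_self]
                  have : (Q ++ [t]).take Q.length = Q := by
                    simpa using List.take_append_of_le_length (Nat.le_refl Q.length)
                  rw [this, hs]
                  rfl
        · have hcase : elimB_scan (Q ++ [t]) = elimB_scan Q := by
            rw [hfold]; simp [h1, h2]
          constructor
          · rw [hcase]
            rw [hstk, pstep_other _ _ _ h1 h2, ih1]
          · intro j hj hg
            rw [hcase]
            have hj' : j < Q.length := by
              rcases Nat.lt_succ_iff_lt_or_eq.mp (by simpa using hj) with h | h
              · exact h
              · subst h
                rw [getD_append_self] at hg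
                exact absurd hg h2
            obtain ⟨htk, hg'⟩ := hdstable j hj' hg
            rw [htk]
            exact ih2 j hj' hg'

theorem head?_getD (P : List String) (h : P ≠ []) : P.head? = some (P.getD 0 "") := by
  cases P with
  | nil => exact absurd rfl h
  | cons a l => simp [List.getD]

theorem elimB_extra_prefix (P : List String) (hpre : P.head? ≠ some "=>") :
    ∀ k, k ≤ P.length → ∀ j : Nat,
      ((PySem.List.enumerate (P.take k) 0).foldl
        (fun extra it =>
          if it.2 = "=>" then
            let t : Int :=
              if PySem.List.pyGetD P (it.1 - 1) "" = ")" then (elimB_scan P).2.getD (it.1 - 1) 0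
              else it.1 - 1
            extra.insert t (extra.getD t 0 + 1)
          else extra)
        (PySem.Dict.empty : PySem.Dict Int Int)).getD (j : Int) 0 = (xOf (P.take k) j : Int) := by
  intro k
  induction k with
  | zero =>
      intro _ j
      simp [PySem.List.enumerate, xOf, PySem.Dict.getD_empty]
  | succ k ih =>
      intro hk j
      have hk' : k < P.length := by omega
      have hsnoc : P.take (k + 1) = P.take k ++ [P.getD k ""] := take_succ_getD P k hk'
      have hlen : (P.take k).length = k := by simp [List.length_take]; omega
      rw [hsnoc, PySem.List.enumerate_append, List.foldl_append, hlen]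
      set g := P.getD k "" with hgdef
      rw [show PySem.List.enumerate [g] ((0 : Int) + (k : Int)) = [((k : Int), g)] by
        simp [PySem.List.enumerate], List.foldl_cons, List.foldl_nil]
      set D := (PySem.List.enumerate (P.take k) 0).foldl
        (fun extra it =>
          if it.2 = "=>" then
            let t : Int :=
              if PySem.List.pyGetD P (it.1 - 1) "" = ")" then (elimB_scan P).2.getD (it.1 - 1) 0
              else it.1 - 1
            extra.insert t (extra.getD t 0 + 1)
          else extra)
        (PySem.Dict.empty : PySem.Dict Int Int) with hDdef
  -- reduce the one fold step
      by_cases hg : g = "=>"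
      · have hk1 : 1 ≤ k := by
          by_contra h0
          have hk0 : k = 0 := by omega
          have hP : P ≠ [] := by intro h; rw [h] at hk'; simp at hk'
          apply hpre
          rw [head?_getD P hP]
          rw [hk0] at hgdef
          rw [← hgdef, hg]
        have htne : P.take k ≠ [] := by
          intro h
          have := congrArg List.length h
          rw [hlen] at this
          simp at this
          omega
        have hcast1 : ((k : Int) - 1) = ((k - 1 : Nat) : Int) := by push_cast [Nat.cast_sub hk1]; ring
        have hQk : P.take k = P.take (k - 1) ++ [P.getD (k - 1) ""] := by
          have h2 : k - 1 + 1 = k := by omega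
          have := take_succ_getD P (k - 1) (by omega)
          rw [h2] at this
          exact this
        have hlast : (P.take k).getLast? = some (P.getD (k - 1) "") := by
          rw [hQk]
          simp
        have htgt : ((if PySem.List.pyGetD P ((k : Int) - 1) "" = ")" then
              (elimB_scan P).2.getD ((k : Int) - 1) 0 else (k : Int) - 1))
            = ((tgtOf (P.take k) : Nat) : Int) := by
          rw [hcast1, PySem.List.pyGetD_natCast]
          by_cases hu : P.getD (k - 1) "" = ")"
          · rw [if_pos hu]
            rw [(elimB_scan_spec P).2 (k - 1) (by omega) hu]
            unfold tgtOf
            rw [hlast, if_pos (by rw [hu]), hQk]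
            simp
          · rw [if_neg hu]
            unfold tgtOf
            rw [hlast, if_neg (by simpa using hu), hlen]
        have hstep : (if (((k : Int), g)).2 = "=>" then
              let t : Int :=
                if PySem.List.pyGetD P ((((k : Int), g)).1 - 1) "" = ")" then
                  (elimB_scan P).2.getD ((((k : Int), g)).1 - 1) 0
                else (((k : Int), g)).1 - 1
              D.insert t (D.getD t 0 + 1)
            else D)
            = D.insert ((tgtOf (P.take k) : Nat) : Int)
                (D.getD ((tgtOf (P.take k) : Nat) : Int) 0 + 1) := by
          show (if g = "=>" then
              let t : Int :=
                if PySem.List.pyGetD P ((k : Int) - 1) "" = ")" then (elimB_scan P).2.getD ((k : Int) - 1) 0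
                else (k : Int) - 1
              D.insert t (D.getD t 0 + 1)
            else D) = _
          rw [if_pos hg]
          show D.insert _ (D.getD _ 0 + 1) = _
          rw [htgt]
        rw [hstep]
        have hxsnoc : xOf (P.take k ++ [g]) j
            = bump (xOf (P.take k)) (tgtOf (P.take k)) j := by
          rw [xOf_snoc (P.take k) g (fun h => absurd h htne) j, if_pos hg]
        rw [hxsnoc]
        by_cases hj : j = tgtOf (P.take k)
        · rw [hj, PySem.Dict.getD_insert_self, ih (by omega) (tgtOf (P.take k))]
          simp [bump]
        · rw [PySem.Dict.getD_insert_of_ne _ _ _ (by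
            intro hh
            exact hj (by exact_mod_cast hh)), ih (by omega) j]
          simp [bump, hj]
      · have hstep : (if (((k : Int), g)).2 = "=>" then
              let t : Int :=
                if PySem.List.pyGetD P ((((k : Int), g)).1 - 1) "" = ")" then
                  (elimB_scan P).2.getD ((((k : Int), g)).1 - 1) 0
                else (((k : Int), g)).1 - 1
              D.insert t (D.getD t 0 + 1)
            else D) = D := by
          show (if g = "=>" then
              let t : Int :=
                if PySem.List.pyGetD P ((k : Int) - 1) "" = ")" then (elimB_scan P).2.getD ((k : Int) - 1) 0
                else (k : Int) - 1
              D.insert t (D.getD t 0 + 1)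
            else D) = D
          rw [if_neg hg]
        rw [hstep, ih (by omega) j,
          xOf_snoc (P.take k) g (fun _ => hg) j, if_neg hg]

theorem elimB_out_aux (E : PySem.Dict Int Int) (R : List String) :
    ∀ (k : Nat) (out : List String),
      (PySem.List.enumerate R ((k : Nat) : Int)).foldl
        (fun out it => out ++ List.replicate (E.getD it.1 0).toNat "~" ++
          [if it.2 = "=>" then "||" else it.2]) out
      = out ++ renderAux (fun j => (E.getD ((j : Nat) : Int) 0).toNat) k R := by
  induction R with
  | nil => intro k out; simp [PySem.List.enumerate, renderAux]
  | cons t R ih =>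
      intro k out
      rw [show PySem.List.enumerate (t :: R) ((k : Nat) : Int)
          = (((k : Nat) : Int), t) :: PySem.List.enumerate R (((k : Nat) : Int) + 1) from rfl,
        List.foldl_cons]
      rw [show (((k : Nat) : Int) + 1) = (((k + 1 : Nat) : Nat) : Int) by push_cast; ring]
      rw [ih (k + 1) _]
      simp [renderAux, repl]

theorem eliminate_implication_alt_render (P : List String) (hpre : P.head? ≠ some "=>") :
    eliminate_implication_alt P = render (xOf P) P := by
  unfold eliminate_implication_alt
  show (PySem.List.enumerate P 0).foldl
      (fun out it => out ++ List.replicate ((elimB_extra P (elimB_scan P).2).getD it.1 0).toNat "~" ++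
        [if it.2 = "=>" then "||" else it.2]) [] = render (xOf P) P
  rw [show PySem.List.enumerate P (0 : Int) = PySem.List.enumerate P ((0 : Nat) : Int) from rfl,
    elimB_out_aux (elimB_extra P (elimB_scan P).2) P 0 []]
  have hx : (fun j => ((elimB_extra P (elimB_scan P).2).getD ((j : Nat) : Int) 0).toNat) = xOf P := by
    funext j
    have h := elimB_extra_prefix P hpre P.length (Nat.le_refl _) j
    rw [List.take_length] at h
    have h2 : (elimB_extra P (elimB_scan P).2).getD ((j : Nat) : Int) 0 = ((xOf P j : Nat) : Int) := h
    rw [h2]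
    exact Int.toNat_natCast _
  rw [hx]
  rfl

theorem eliminate_implication_render (P : List String) (hpre : P.head? ≠ some "=>") :
    eliminate_implication P = render (xOf P) P := by
  have h := loopA_render P [] (fun _ => hpre)
  rw [show render (xOf []) [] = ([] : List String) from rfl] at h
  simpa [eliminate_implication] using h

-- ===== VERDICT (by name: the statement is the Claim_ definition above) =====
theorem eliminate_implication_spec : Claim_equal_eliminate_implication := by
  intro expression _hdom hpre
  have hpre' : expression.head? ≠ some "=>" := hpre
  unfold Spec_eliminate_implication
  rw [eliminate_implication_render expression hpre',
    eliminate_implication_alt_render expression hpre']
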